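-- pv_equiv track=rewrite | github.com/Jittor/jittor | python/jittor/utils/asm_tuner.py | shsplit
-- ===== SOURCE A (Python) =====
-- def shsplit(s):
--     s1 = s.split(' ')
--     s2 = []
--     count = 0
--     for s in s1:
--         nc = s.count('"') + s.count('\'')
--         if count&1:
--             count += nc
--             s2[-1] += " "
--             s2[-1] += s
--         else:
--             count = nc
--             s2.append(s)
--     return s2
-- ===== SOURCE B (Python) =====
-- def shsplit(s):
--     out = []
--     cur = []
--     inq = False
--     for c in s:
--         if c == ' ' and not inq:
--             out.append(''.join(cur))
--             cur = []
--         else: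
--             cur.append(c)
--             if c == '"' or c == "'":
--                 inq = not inq
--     out.append(''.join(cur))
--     return out
-- ===== Notes on version B (the rewrite author's own statement) =====
-- stated objective: alternative
-- what changed: replaces split-on-space followed by a quote-counting merge of adjacent pieces with a single character-by-character scan that keeps a current-token buffer and a quote-parity flag
import Mathlib
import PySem

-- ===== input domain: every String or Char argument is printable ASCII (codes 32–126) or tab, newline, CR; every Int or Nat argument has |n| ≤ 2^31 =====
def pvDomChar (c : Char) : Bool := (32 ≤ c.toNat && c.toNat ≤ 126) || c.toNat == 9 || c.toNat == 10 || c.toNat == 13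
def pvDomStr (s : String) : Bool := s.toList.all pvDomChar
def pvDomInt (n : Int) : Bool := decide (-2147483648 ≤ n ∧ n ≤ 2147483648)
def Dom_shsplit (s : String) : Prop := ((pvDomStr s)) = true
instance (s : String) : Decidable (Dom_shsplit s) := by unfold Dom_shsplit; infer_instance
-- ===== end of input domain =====

-- B replaces A's split-on-space-then-merge-quoted-pieces with a single character scan
-- keeping a current-token buffer and a quote-parity flag; same return value on every string.

-- ===== PORT A =====
-- s2[-1] += x : Python appends to the last element (IndexError on [] — unreachable in A,
-- since the first iteration always takes the even branch; on [] this helper returns []).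
def pvAppendLast (s2 : List (List Char)) (x : List Char) : List (List Char) :=
  match s2 with
  | [] => []
  | [a] => [a ++ x]
  | a :: rest => a :: pvAppendLast rest x

-- the 'for s in s1' loop of A, state (count, s2); quote counting via PySem.Chars.count
def pvLoopA : List (List Char) → Int → List (List Char) → List (List Char)
  | [], _, s2 => s2
  | t :: rest, count, s2 =>
    let nc : Int := (PySem.Chars.count t ['"'] : Int) + (PySem.Chars.count t ['\''] : Int)
    if PySem.Int.band count 1 ≠ 0 then
      pvLoopA rest (count + nc) (pvAppendLast (pvAppendLast s2 [' ']) t)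
    else
      pvLoopA rest nc (s2 ++ [t])

def shsplit (s : String) : List String :=
  (pvLoopA (PySem.Chars.splitOn s.toList [' ']) 0 []).map String.ofList

-- ===== PORT B =====
-- the 'for c in s' loop of B, state (out, cur, inq); the final out.append(''.join(cur))
-- is the base case; ''.join is the String.ofList map at the end
def pvLoopB : List Char → List (List Char) → List Char → Bool → List (List Char)
  | [], out, cur, _ => out ++ [cur]
  | c :: cs, out, cur, inq =>
    if c = ' ' ∧ inq = false then
      pvLoopB cs (out ++ [cur]) [] false
    else
      pvLoopB cs out (cur ++ [c]) (if c = '"' ∨ c = '\'' then !inq else inq)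

def shsplit_alt (s : String) : List String :=
  (pvLoopB s.toList [] [] false).map String.ofList

-- ===== PRECONDITION & SPEC =====
def Spec_shsplit (s : String) (out : List String) : Prop := out = shsplit_alt s
instance (s : String) (out : List String) : Decidable (Spec_shsplit s out) := by
  unfold Spec_shsplit; infer_instance

-- ===== CLAIM (what is proved, stated in full; the proofs are below) =====
def Claim_equal_shsplit : Prop := ∀ (s : String), Dom_shsplit s → Spec_shsplit s (shsplit s)

-- ===== LEMMAS AND PROOFS =====

-- B's scan with the finished tokens factored out
def pvM : List Char → List Char → Bool → List (List Char)
  | [], cur, _ => [cur]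
  | c :: cs, cur, inq =>
    if c = ' ' ∧ inq = false then cur :: pvM cs [] false
    else pvM cs (cur ++ [c]) (if c = '"' ∨ c = '\'' then !inq else inq)

-- quote parity of a char list
def pvParb : List Char → Bool
  | [] => false
  | c :: cs => xor (decide (c = '"' ∨ c = '\'')) (pvParb cs)

theorem pvLoopB_eq_pvM (cs : List Char) : ∀ (out : List (List Char)) (cur : List Char)
    (inq : Bool), pvLoopB cs out cur inq = out ++ pvM cs cur inq := by
  induction cs with
  | nil => intro out cur inq; simp [pvLoopB, pvM]
  | cons c cs ih =>
    intro out cur inq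
    by_cases h : c = ' ' ∧ inq = false <;> simp [pvLoopB, pvM, h, ih]

theorem pvParb_append (a b : List Char) : pvParb (a ++ b) = xor (pvParb a) (pvParb b) := by
  induction a with
  | nil => simp [pvParb]
  | cons c a ih => simp [pvParb, ih]

theorem pvM_append (p : List Char) (hp : ' ' ∉ p) : ∀ (cs cur : List Char) (inq : Bool),
    pvM (p ++ cs) cur inq = pvM cs (cur ++ p) (xor inq (pvParb p)) := by
  induction p with
  | nil => intro cs cur inq; simp [pvParb]
  | cons c p ih =>
    intro cs cur inq
    have hc : c ≠ ' ' := by intro h; exact hp (by simp [h])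
    have hp' : ' ' ∉ p := fun h => hp (List.mem_cons_of_mem _ h)
    rw [List.cons_append, pvM]
    simp only [hc, false_and, if_false]
    rw [ih hp']
    congr 1
    · simp
    · by_cases hq : c = '"' ∨ c = '\'' <;>
        cases inq <;> simp [pvParb, hq]

-- PySem.Chars.count with a single-char needle is List.count
theorem pvCountGo (c : Char) (l : List Char) : ∀ (fuel acc : Nat), l.length ≤ fuel →
    PySem.Chars.count.go [c] fuel l acc = acc + l.count c := by
  induction l with
  | nil => intro fuel acc _; cases fuel <;> simp [PySem.Chars.count.go]
  | cons c' rest ih =>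
    intro fuel acc hf
    cases fuel with
    | zero => simp at hf
    | succ f =>
      rw [PySem.Chars.count.go]
      by_cases h : c = c'
      · have hpre : ([c].isPrefixOf (c' :: rest)) = true := by
          simp [List.isPrefixOf, h]
        simp only [hpre, if_true, List.length_singleton, List.drop_one, List.tail_cons]
        rw [ih f (acc + 1) (by simpa using hf)]
        simp [h]
        omega
      · have hpre : ([c].isPrefixOf (c' :: rest)) = false := by
          simp [List.isPrefixOf]; intro hcc; exact absurd hcc h
        simp [hpre, ih f acc (by simpa using hf), Ne.symm h]

theorem pvCount_single (c : Char) (l : List Char) :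
    PySem.Chars.count l [c] = l.count c := by
  simp [PySem.Chars.count, pvCountGo c l l.length 0 le_rfl]

-- PySem.Chars.splitOn with a single-char separator is List.splitOn
theorem pvSplitGo (c : Char) (l : List Char) : ∀ (fuel : Nat) (cur : List Char)
    (acc : List (List Char)), l.length ≤ fuel →
    PySem.Chars.splitOn.go [c] fuel l cur acc
      = acc.reverse ++ (l.splitOn c).modifyHead (cur.reverse ++ ·) := by
  induction l with
  | nil =>
    intro fuel cur acc _
    cases fuel <;> simp [PySem.Chars.splitOn.go, List.splitOn_nil, List.modifyHead]
  | cons c' rest ih =>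
    intro fuel cur acc hf
    cases fuel with
    | zero => simp at hf
    | succ f =>
      rw [PySem.Chars.splitOn.go]
      have hrest : rest.length ≤ f := by simpa using hf
      by_cases h : c = c'
      · have hpre : ([c].isPrefixOf (c' :: rest)) = true := by
          simp [List.isPrefixOf, h]
        have hbe : (c' == c) = true := by simp [h]
        rw [if_pos hpre]
        simp only [List.length_singleton, List.drop_one, List.tail_cons]
        rw [ih f [] (cur.reverse :: acc) (by simpa using hrest)]
        obtain ⟨h0, t0, he⟩ := List.exists_cons_of_ne_nil (List.splitOnP_ne_nil (· == c) rest)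
        simp [List.splitOn, List.splitOnP_cons, hbe, he, List.modifyHead]
      · have hpre : ([c].isPrefixOf (c' :: rest)) = false := by
          simp [List.isPrefixOf]; intro hcc; exact absurd hcc h
        simp only [hpre]
        rw [ih f (c' :: cur) acc hrest]
        have hne : (c' == c) = false := by simp; intro hcc; exact h hcc.symm
        simp [List.splitOn, List.splitOnP_cons, hne]
        obtain ⟨h0, t0, he⟩ := List.exists_cons_of_ne_nil (List.splitOnP_ne_nil (· == c) rest)
        simp [he, List.modifyHead]

theorem pvSplitOn_single (c : Char) (l : List Char) :
    PySem.Chars.splitOn l [c] = l.splitOn c := by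
  rw [PySem.Chars.splitOn, pvSplitGo c l (l.length + 1) [] [] (by omega)]
  obtain ⟨h0, t0, he⟩ := List.exists_cons_of_ne_nil (List.splitOnP_ne_nil (· == c) l)
  simp [List.splitOn] at he ⊢
  simp [he, List.modifyHead]

-- no piece of l.splitOn c contains c
theorem pvSplitOn_not_mem (c : Char) (l : List Char) :
    ∀ p ∈ l.splitOn c, c ∉ p := by
  induction l with
  | nil => simp [List.splitOn_nil]
  | cons c' rest ih =>
    intro p hp
    by_cases h : c' = c
    · rw [List.splitOn, List.splitOnP_cons] at hp
      simp [h] at hp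
      rcases hp with hp | hp
      · simp [hp]
      · exact ih p hp
    · rw [List.splitOn, List.splitOnP_cons] at hp
      have hne : (c' == c) = false := by simp [h]
      obtain ⟨h0, t0, he⟩ := List.exists_cons_of_ne_nil (List.splitOnP_ne_nil (· == c) rest)
      rw [hne] at hp
      simp only [if_neg Bool.false_ne_true, he, List.modifyHead] at hp
      rcases List.mem_cons.mp hp with hp | hp
      · subst hp
        intro hmem
        rcases List.mem_cons.mp hmem with hm | hm
        · exact h hm.symm
        · exact ih h0 (by simp [List.splitOn, he]) hm
      · exact ih p (by simp [List.splitOn, he, hp])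

theorem pvAppendLast_snoc (x : List Char) : ∀ (s2 : List (List Char)) (cur : List Char),
    pvAppendLast (s2 ++ [cur]) x = s2 ++ [cur ++ x] := by
  intro s2
  induction s2 with
  | nil => intro cur; simp [pvAppendLast]
  | cons a s2 ih =>
    intro cur
    cases s2 with
    | nil => simp [pvAppendLast]
    | cons b s2 =>
      rw [List.cons_append,
        show pvAppendLast (a :: (b :: s2 ++ [cur])) x
          = a :: pvAppendLast (b :: s2 ++ [cur]) x from rfl, ih]
      simp

-- quote parity as a Nat-count condition
theorem pvParb_count (p : List Char) :
    pvParb p = decide ((p.count '"' + p.count '\'') % 2 = 1) := by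
  induction p with
  | nil => simp [pvParb]
  | cons c p ih =>
    simp only [pvParb, ih, List.count_cons]
    rcases Nat.mod_two_eq_zero_or_one (p.count '"' + p.count '\'') with h | h <;>
      by_cases h1 : c = '"' <;> by_cases h2 : c = '\'' <;>
      simp_all <;> omega

-- parity of A's Int counter agrees with the Bool flag
theorem pvBand_parity (n : Nat) :
    (PySem.Int.band (n : Int) 1 ≠ 0) ↔ (n % 2 = 1) := by
  rw [PySem.Int.band_one, PySem.Int.mod_eq_emod_of_pos (by omega)]
  omega

-- main invariant: A's merge loop over the remaining pieces equals B's scan of the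
-- remaining characters (a space before each remaining piece)
theorem pvLoopA_eq_pvM (ps : List (List Char)) : ∀ (s2 : List (List Char)) (cur : List Char)
    (count : Int), (∀ p ∈ ps, ' ' ∉ p) → 0 ≤ count →
    ((PySem.Int.band count 1 ≠ 0) ↔ pvParb cur = true) →
    pvLoopA ps count (s2 ++ [cur])
      = s2 ++ pvM ((ps.map (fun p => ' ' :: p)).flatten) cur (pvParb cur) := by
  induction ps with
  | nil => intro s2 cur count _ _ _; simp [pvLoopA, pvM]
  | cons p ps ih =>
    intro s2 cur count hps hnn hinv
    have hp : ' ' ∉ p := hps p (List.mem_cons_self ..)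
    have hps' : ∀ q ∈ ps, ' ' ∉ q := fun q hq => hps q (List.mem_cons_of_mem _ hq)
    have hnc : ((PySem.Chars.count p ['"'] : Int) + (PySem.Chars.count p ['\''] : Int))
        = ((p.count '"' + p.count '\'' : Nat) : Int) := by
      simp [pvCount_single]
    rw [pvLoopA]
    simp only [hnc]
    by_cases hodd : PySem.Int.band count 1 ≠ 0
    · -- odd: merge the piece into the last token
      have hinq : pvParb cur = true := hinv.mp hodd
      rw [if_pos hodd]
      rw [pvAppendLast_snoc, pvAppendLast_snoc, List.append_assoc cur [' '] p,
        List.singleton_append]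
      have hcount' : 0 ≤ count + ((p.count '"' + p.count '\'' : Nat) : Int) := by positivity
      have hpar' : pvParb (cur ++ (' ' :: p)) = xor (pvParb cur) (pvParb p) := by
        rw [pvParb_append]; simp [pvParb]
      have hinv' : (PySem.Int.band (count + ((p.count '"' + p.count '\'' : Nat) : Int)) 1 ≠ 0)
          ↔ pvParb (cur ++ (' ' :: p)) = true := by
        rw [hpar', hinq]
        rw [PySem.Int.band_one, PySem.Int.mod_eq_emod_of_pos (by omega)] at hodd ⊢
        rw [pvParb_count]
        rcases Nat.even_or_odd (p.count '"' + p.count '\'') with he | he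
        · simp [Nat.even_iff] at he; simp [he]; omega
        · simp [Nat.odd_iff] at he; simp [he]; omega
      rw [ih (s2) (cur ++ (' ' :: p)) _ hps' hcount' hinv']
      rw [List.map_cons, List.flatten_cons, List.cons_append, pvM]
      simp only [hinq]
      rw [if_neg (by simp)]
      rw [pvM_append p hp, hpar', hinq]
      simp [List.append_assoc]
    · -- even: start a new token
      have hinq : pvParb cur = false := by
        cases h : pvParb cur
        · rfl
        · exact absurd (hinv.mpr h) hodd
      rw [if_neg hodd]
      have hinv' : (PySem.Int.band ((p.count '"' + p.count '\'' : Nat) : Int) 1 ≠ 0)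
          ↔ pvParb p = true := by
        rw [pvBand_parity, pvParb_count]; simp
      rw [show s2 ++ [cur] ++ [p] = (s2 ++ [cur]) ++ [p] by simp,
        ih (s2 ++ [cur]) p _ hps' (by positivity) hinv']
      rw [List.map_cons, List.flatten_cons, List.cons_append, pvM]
      simp only [hinq, and_true]
      rw [pvM_append p hp]
      simp

theorem pvIntercalate_single (x : Char) (ps : List (List Char)) (p0 : List Char) :
    List.intercalate [x] (p0 :: ps) = p0 ++ (ps.map (fun p => x :: p)).flatten := by
  induction ps generalizing p0 with
  | nil => simp [List.intercalate]
  | cons q ps ih =>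
    simp only [List.intercalate, List.intersperse] at ih ⊢
    simp [ih]

-- ===== VERDICT (by name: the statement is the Claim_ definition above) =====
theorem shsplit_spec : Claim_equal_shsplit := by
  intro s _
  unfold Spec_shsplit shsplit shsplit_alt
  congr 1
  rw [pvSplitOn_single, pvLoopB_eq_pvM]
  obtain ⟨p0, ps, he⟩ := List.exists_cons_of_ne_nil
    (show s.toList.splitOn ' ' ≠ [] from List.splitOnP_ne_nil _ _)
  have hfree := pvSplitOn_not_mem ' ' s.toList
  rw [he] at hfree
  have hp0 : ' ' ∉ p0 := hfree p0 (List.mem_cons_self ..)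
  have hps : ∀ p ∈ ps, ' ' ∉ p := fun p hp => hfree p (List.mem_cons_of_mem _ hp)
  have hchars : s.toList = p0 ++ (ps.map (fun p => ' ' :: p)).flatten := by
    conv_lhs => rw [← List.intercalate_splitOn ' ' (xs := s.toList), he]
    exact pvIntercalate_single ' ' ps p0
  rw [he, pvLoopA]
  have h0 : ¬ (PySem.Int.band (0 : Int) 1 ≠ 0) := by decide
  rw [if_neg h0]
  have hinv : (PySem.Int.band ((PySem.Chars.count p0 ['"'] : Int)
      + (PySem.Chars.count p0 ['\''] : Int)) 1 ≠ 0) ↔ pvParb p0 = true := by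
    rw [show ((PySem.Chars.count p0 ['"'] : Int) + (PySem.Chars.count p0 ['\''] : Int))
        = ((p0.count '"' + p0.count '\'' : Nat) : Int) by simp [pvCount_single],
      pvBand_parity, pvParb_count]
    simp
  have hmain := pvLoopA_eq_pvM ps [] p0 _ hps (by positivity) hinv
  simp only [List.nil_append] at hmain ⊢
  rw [hmain, hchars, pvM_append p0 hp0]
  simp
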